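-- pv_equiv track=rewrite | github.com/geekpirate/OnlineAssesments | Better/Task2.py | Solution
-- ===== SOURCE A (Python) =====
-- def Solution(A):
--     if len(A) == 0:
--         return 0
--
--     visited = -1
--     prev = -1
--     temp = 0
--     prevcnt = 0
--     totalCount = 0
--
--     for num in A:
--         if num == prev or num == visited:
--             temp += 1
--         else:
--             temp = prevcnt + 1
--
--         if num == visited:
--             prevcnt += 1
--         else:
--             prevcnt = 1
--             prev = visited
--             visited = num
--
--         totalCount = max(temp, totalCount)
--
--     return totalCount
-- ===== SOURCE B (Python) =====
-- def Solution(A):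
--     best = 0
--     left = 0
--     right = 0
--     cnt = {}
--     for num in A:
--         cnt[num] = cnt.get(num, 0) + 1
--         while len(cnt) > 2:
--             out = A[left]
--             cnt[out] = cnt[out] - 1
--             if cnt[out] == 0:
--                 del cnt[out]
--             left += 1
--         best = max(best, right - left + 1)
--         right += 1
--     return best
-- ===== Notes on version B (the rewrite author's own statement) =====
-- stated objective: idiomatic
-- what changed: Replaced A's ad-hoc prev/visited/prevcnt state machine with the standard two-pointer sliding window keeping a value->count dict, shrinking from the left while more than 2 distinct values are in the window.
import Mathlib
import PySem

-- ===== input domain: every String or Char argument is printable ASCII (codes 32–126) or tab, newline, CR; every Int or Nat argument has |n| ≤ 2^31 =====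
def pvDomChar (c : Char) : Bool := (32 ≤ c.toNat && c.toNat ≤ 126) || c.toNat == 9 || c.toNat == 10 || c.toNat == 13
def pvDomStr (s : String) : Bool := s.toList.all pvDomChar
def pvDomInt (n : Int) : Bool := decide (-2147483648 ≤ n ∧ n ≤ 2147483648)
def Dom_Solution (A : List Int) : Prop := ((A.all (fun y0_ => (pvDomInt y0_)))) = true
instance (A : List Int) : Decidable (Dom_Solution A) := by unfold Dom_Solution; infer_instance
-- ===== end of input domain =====

-- B replaces A's prev/visited/prevcnt state machine by the standard sliding-window-with-counts algorithm (idiomatic; same O(n) cost).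

-- ===== PORT A =====
-- state: (visited, prev, temp, prevcnt, totalCount)
def stepA (st : Int × Int × Int × Int × Int) (num : Int) : Int × Int × Int × Int × Int :=
  let temp' := if num = st.2.1 ∨ num = st.1 then st.2.2.1 + 1 else st.2.2.2.1 + 1
  let vp := if num = st.1 then (st.1, st.2.1, st.2.2.2.1 + 1) else (num, st.1, (1 : Int))
  (vp.1, vp.2.1, temp', vp.2.2, max temp' st.2.2.2.2)

def Solution (A : List Int) : Int :=
  if A.length = 0 then 0
  else (A.foldl stepA (-1, -1, 0, 0, 0)).2.2.2.2

-- ===== PORT B =====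
-- the 'while len(cnt) > 2' loop; fuel only makes it total (the guard fails before fuel runs out)
def shrinkLoop (A : List Int) : Nat → PySem.Dict Int Int → Int → PySem.Dict Int Int × Int
  | 0, cnt, left => (cnt, left)
  | fuel+1, cnt, left =>
    if 2 < cnt.size then
      match PySem.List.pyGet? A left with
      | none => (cnt, left)   -- unreachable: left always indexes inside the current window
      | some out =>
        let c := cnt.getD out 0 - 1    -- cnt[out] - 1 (the key is always present: out lies in the window)
        let cnt1 := cnt.insert out c
        let cnt2 := if c = 0 then cnt1.erase out else cnt1
        shrinkLoop A fuel cnt2 (left + 1)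
    else (cnt, left)

-- state: (best, left, right, cnt)
def stepB (A : List Int) (st : Int × Int × Int × PySem.Dict Int Int) (num : Int) :
    Int × Int × Int × PySem.Dict Int Int :=
  let cnt := st.2.2.2.insert num (st.2.2.2.getD num 0 + 1)
  let r := shrinkLoop A A.length cnt st.2.1
  (max st.1 (st.2.2.1 - r.2 + 1), r.2, st.2.2.1 + 1, r.1)

def Solution_alt (A : List Int) : Int :=
  (A.foldl (stepB A) (0, 0, 0, PySem.Dict.empty)).1

-- ===== PRECONDITION & SPEC =====
def Spec_Solution (A : List Int) (out : Int) : Prop := out = Solution_alt A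
instance (A : List Int) (out : Int) : Decidable (Spec_Solution A out) := by unfold Spec_Solution; infer_instance

-- ===== CLAIM (what is proved, stated in full; the proofs are below) =====
def Claim_equal_Solution : Prop := ∀ (A : List Int), Dom_Solution A → Spec_Solution A (Solution A)

-- ===== LEMMAS AND PROOFS =====

-- The joint invariant relating A's state machine and B's sliding window after processing the prefix p:
-- p = a ++ c ++ (trailing run of `visited` of length k); the window is c ++ run, left = |a|,
-- temp = window length, prev is the element just before the run (or -1 on an all-equal prefix).
def SWInv (p : List Int) (sA : Int × Int × Int × Int × Int)
    (sB : Int × Int × Int × PySem.Dict Int Int) : Prop :=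
  ∃ (a c : List Int) (k : Nat),
    p = a ++ c ++ List.replicate k sA.1 ∧
    1 ≤ k ∧
    (∀ x ∈ c, x = sA.1 ∨ x = sA.2.1) ∧
    (a ++ c = [] → sA.2.1 = -1) ∧
    (a ++ c ≠ [] → (a ++ c).getLast? = some sA.2.1 ∧ sA.2.1 ≠ sA.1) ∧
    sB.2.1 = (a.length : Int) ∧
    sB.2.2.1 = (p.length : Int) ∧
    sA.2.2.1 = ((c.length + k : Nat) : Int) ∧
    sA.2.2.2.1 = (k : Int) ∧
    sA.2.2.2.2 = sB.1 ∧
    (∀ x : Int, sB.2.2.2.getD x 0 = ((c ++ List.replicate k sA.1).count x : Int)) ∧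
    (∀ y ∈ sB.2.2.2.keys, y ∈ c ++ List.replicate k sA.1) ∧
    sB.2.2.2.keys.Nodup

-- generic list facts used below
lemma nodup_len_le_two {l : List Int} {u v : Int} (hn : l.Nodup)
    (hs : ∀ x ∈ l, x = u ∨ x = v) : l.length ≤ 2 := by
  have h1 : l.toFinset ⊆ ({u, v} : Finset Int) := by
    intro x hx
    rcases hs x (List.mem_toFinset.mp hx) with h | h <;> simp [h]
  have h2 := Finset.card_le_card h1
  have h3 : ({u, v} : Finset Int).card ≤ 2 :=
    le_trans (Finset.card_insert_le u {v}) (by simp)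
  rw [List.toFinset_card_of_nodup hn] at h2
  omega

lemma nodup_len_ge_three {l : List Int} {u v w : Int} (hn : l.Nodup)
    (hu : u ∈ l) (hv : v ∈ l) (hw : w ∈ l)
    (huv : u ≠ v) (huw : u ≠ w) (hvw : v ≠ w) : 3 ≤ l.length := by
  have h1 : ({u, v, w} : Finset Int) ⊆ l.toFinset := by
    intro x hx
    rcases Finset.mem_insert.mp hx with h | hx
    · simpa [h] using hu
    rcases Finset.mem_insert.mp hx with h | hx
    · simpa [h] using hv
    · simpa [Finset.mem_singleton.mp hx] using hw
  have h2 := Finset.card_le_card h1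
  have h3 : ({u, v, w} : Finset Int).card = 3 := by
    rw [Finset.card_insert_of_notMem (by simp [huv, huw]),
        Finset.card_insert_of_notMem (by simp [hvw]), Finset.card_singleton]
  rw [List.toFinset_card_of_nodup hn, h3] at h2
  exact h2

-- facts about PySem.Dict.erase (not in the prelude's lemma list)
lemma keys_erase (d : PySem.Dict Int Int) (k : Int) :
    (d.erase k).keys = d.keys.filter (fun y => !(y == k)) := by
  simp only [PySem.Dict.erase, PySem.Dict.keys, List.filter_map]
  rfl

lemma get?_erase_self (d : PySem.Dict Int Int) (k : Int) :
    (d.erase k).get? k = none := by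
  simp only [PySem.Dict.erase, PySem.Dict.get?, Option.map_eq_none_iff]
  rw [List.find?_eq_none]
  intro p hp
  simp only [List.mem_filter] at hp
  simpa using hp.2

lemma get?_erase_of_ne (d : PySem.Dict Int Int) {k k' : Int} (h : k' ≠ k) :
    (d.erase k).get? k' = d.get? k' := by
  obtain ⟨items⟩ := d
  simp only [PySem.Dict.erase, PySem.Dict.get?]
  congr 1
  induction items with
  | nil => rfl
  | cons p t ih =>
    rw [List.filter_cons]
    by_cases hp : p.1 = k
    · rw [if_neg (by simp [hp]), List.find?_cons_of_neg (by simp [hp, Ne.symm h]), ih]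
    · rw [if_pos (by simp [hp])]
      by_cases hp' : p.1 = k'
      · rw [List.find?_cons_of_pos (by simp [hp']), List.find?_cons_of_pos (by simp [hp'])]
      · rw [List.find?_cons_of_neg (by simp [hp']), List.find?_cons_of_neg (by simp [hp']), ih]

lemma mem_keys_of_getD_ne (d : PySem.Dict Int Int) {x : Int} (h : d.getD x 0 ≠ 0) :
    x ∈ d.keys := by
  by_contra hx
  have h0 : d.get? x = none := (PySem.Dict.get?_eq_none_iff_not_mem_keys _ _).mpr hx
  rw [PySem.Dict.getD_eq_get?_getD, h0] at h
  exact h rfl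

lemma size_eq_keys_length (d : PySem.Dict Int Int) : d.size = d.keys.length := by
  simp [PySem.Dict.size, PySem.Dict.keys]

lemma shrink_noop (A : List Int) (fuel : Nat) (cnt : PySem.Dict Int Int) (left : Int)
    (h : cnt.size ≤ 2) : shrinkLoop A fuel cnt left = (cnt, left) := by
  cases fuel with
  | zero => rfl
  | succ f => simp only [shrinkLoop]; rw [if_neg (by omega)]

lemma getLast?_append_replicate (xs : List Int) (v : Int) {k : Nat} (hk : 1 ≤ k) :
    (xs ++ List.replicate k v).getLast? = some v := by
  obtain ⟨j, rfl⟩ : ∃ j, k = j + 1 := ⟨k - 1, by omega⟩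
  rw [List.replicate_succ', ← List.append_assoc, List.getLast?_concat]

lemma getLast?_cons_of_ne_nil' {x : Int} {d : List Int} (h : d ≠ []) :
    (x :: d).getLast? = d.getLast? := by
  cases d with
  | nil => exact absurd rfl h
  | cons y t => rw [List.getLast?_cons_cons]

-- the while loop pops exactly the part d of the window that precedes the trailing run
lemma shrink_spec (A : List Int) (vtd prevv num : Int) (k : Nat) (rest : List Int)
    (hn1 : num ≠ vtd) (hn2 : num ≠ prevv) (hk : 1 ≤ k) :
    ∀ (d : List Int) (l : Nat) (cnt : PySem.Dict Int Int) (fuel : Nat),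
    d.length ≤ fuel →
    (d ≠ [] → prevv ≠ vtd) →
    A.drop l = d ++ List.replicate k vtd ++ num :: rest →
    (∀ x ∈ d, x = vtd ∨ x = prevv) →
    (d ≠ [] → d.getLast? = some prevv) →
    (∀ x : Int, cnt.getD x 0 = ((d ++ List.replicate k vtd ++ [num]).count x : Int)) →
    (∀ y ∈ cnt.keys, y ∈ d ++ List.replicate k vtd ++ [num]) →
    cnt.keys.Nodup →
    ∃ cnt', shrinkLoop A fuel cnt (l : Int) = (cnt', ((l + d.length : Nat) : Int)) ∧
      (∀ x : Int, cnt'.getD x 0 = ((List.replicate k vtd ++ [num]).count x : Int)) ∧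
      (∀ y ∈ cnt'.keys, y ∈ List.replicate k vtd ++ [num]) ∧
      cnt'.keys.Nodup := by
  intro d
  induction d with
  | nil =>
    intro l cnt fuel _ _ _ _ _ hcnt hkeys hnd
    have hsz : cnt.size ≤ 2 := by
      rw [size_eq_keys_length]
      refine nodup_len_le_two (u := vtd) (v := num) hnd ?_
      intro y hy
      have h0 := hkeys y hy
      rw [List.nil_append] at h0
      rcases List.mem_append.mp h0 with h | h
      · exact Or.inl (List.eq_of_mem_replicate h)
      · exact Or.inr (List.mem_singleton.mp h)
    exact ⟨cnt, by rw [shrink_noop _ _ _ _ hsz]; simp, by simpa using hcnt, by simpa using hkeys, hnd⟩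
  | cons x d' ih =>
    intro l cnt fuel hfuel hpv hdrop hd hlast hcnt hkeys hnd
    obtain ⟨f, rfl⟩ : ∃ f, fuel = f + 1 := ⟨fuel - 1, by simp at hfuel; omega⟩
    have hpv' : prevv ≠ vtd := hpv (by simp)
    have hprevmem : prevv ∈ x :: d' := List.mem_of_getLast? (hlast (by simp))
    set tailw := d' ++ List.replicate k vtd ++ [num] with htailw
    have hcnt' : ∀ y : Int, cnt.getD y 0 = ((x :: tailw).count y : Int) := by
      intro y; rw [hcnt y]; rfl
    -- the three distinct values visited, prev, num are all keys: the guard is true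
    have hmem : ∀ {y : Int}, y ∈ x :: tailw → y ∈ cnt.keys := by
      intro y hy
      apply mem_keys_of_getD_ne
      rw [hcnt' y]
      have h1 : 0 < (x :: tailw).count y := List.count_pos_iff.mpr hy
      exact_mod_cast Nat.pos_iff_ne_zero.mp h1
    have hguard : 2 < cnt.size := by
      rw [size_eq_keys_length]
      refine nodup_len_ge_three (u := prevv) (v := vtd) (w := num) hnd
        (hmem ?_) (hmem ?_) (hmem ?_) hpv' (Ne.symm hn2) (Ne.symm hn1)
      · rcases List.mem_cons.mp hprevmem with h | h
        · exact List.mem_cons.mpr (Or.inl h)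
        · exact List.mem_cons.mpr (Or.inr (List.mem_append.mpr (Or.inl
            (List.mem_append.mpr (Or.inl h)))))
      · exact List.mem_cons.mpr (Or.inr (List.mem_append.mpr (Or.inl
          (List.mem_append.mpr (Or.inr (List.mem_replicate.mpr ⟨by omega, rfl⟩))))))
      · exact List.mem_cons.mpr (Or.inr (List.mem_append.mpr (Or.inr
          (List.mem_singleton.mpr rfl))))
    have hget : PySem.List.pyGet? A (l : Int) = some x := by
      rw [PySem.List.pyGet?_natCast, ← List.head?_drop, hdrop]
      simp
    set c0 : Int := cnt.getD x 0 - 1 with hc0def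
    have hc0 : c0 = (tailw.count x : Int) := by
      rw [hc0def, hcnt' x, List.count_cons_self]
      push_cast
      ring
    set cnt1 := cnt.insert x c0 with hcnt1
    set cnt2 := if c0 = 0 then cnt1.erase x else cnt1 with hcnt2
    have hcnt2D : ∀ y : Int, cnt2.getD y 0 = (tailw.count y : Int) := by
      intro y
      by_cases hy : y = x
      · rw [hy]
        by_cases hz : c0 = 0
        · rw [hcnt2, if_pos hz, PySem.Dict.getD_eq_get?_getD, get?_erase_self]
          simp only [Option.getD_none]
          rw [← hc0, hz]
        · rw [hcnt2, if_neg hz, hcnt1, PySem.Dict.getD_insert_self]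
          exact hc0
      · have hstep : cnt1.getD y 0 = (tailw.count y : Int) := by
          rw [hcnt1, PySem.Dict.getD_insert_of_ne _ _ _ hy, hcnt' y,
            List.count_cons_of_ne (Ne.symm hy)]
        by_cases hz : c0 = 0
        · rw [hcnt2, if_pos hz, PySem.Dict.getD_eq_get?_getD, get?_erase_of_ne _ hy,
            ← PySem.Dict.getD_eq_get?_getD, hstep]
        · rw [hcnt2, if_neg hz, hstep]
    have hcnt2K : ∀ y ∈ cnt2.keys, y ∈ tailw := by
      intro y hy
      have hy1 : y ∈ cnt1.keys := by
        by_cases hz : c0 = 0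
        · rw [hcnt2, if_pos hz, keys_erase] at hy
          exact (List.mem_filter.mp hy).1
        · rwa [hcnt2, if_neg hz] at hy
      rcases (PySem.Dict.mem_keys_insert _ _ _ _).mp (hcnt1 ▸ hy1) with h | h
      · -- y = x : x is still a key only when its remaining count is positive
        subst h
        have hx2 : y ∈ cnt2.keys := hy
        have hz : ¬ c0 = 0 := by
          intro hz
          rw [hcnt2, if_pos hz, keys_erase, List.mem_filter] at hx2
          simp at hx2
        have : 0 < tailw.count y := by
          have := hc0
          omega
        exact List.count_pos_iff.mp this
      · have hw : y ∈ x :: tailw := hkeys y h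
        rcases List.mem_cons.mp hw with h' | h'
        · -- y = x again: same positivity argument
          subst h'
          have hz : ¬ c0 = 0 := by
            intro hz
            rw [hcnt2, if_pos hz, keys_erase, List.mem_filter] at hy
            simp at hy
          have : 0 < tailw.count y := by
            have := hc0
            omega
          exact List.count_pos_iff.mp this
        · exact h'
    have hcnt2N : cnt2.keys.Nodup := by
      have h1 : cnt1.keys.Nodup := hcnt1 ▸ PySem.Dict.nodup_keys_insert _ _ _ hnd
      by_cases hz : c0 = 0
      · rw [hcnt2, if_pos hz, keys_erase]
        exact List.Nodup.filter _ h1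
      · rw [hcnt2, if_neg hz]
        exact h1
    have hdrop' : A.drop (l + 1) = d' ++ List.replicate k vtd ++ num :: rest := by
      rw [← List.tail_drop, hdrop]
      simp
    have hlast' : d' ≠ [] → d'.getLast? = some prevv := by
      intro hne
      have h2 := hlast (by simp)
      rwa [getLast?_cons_of_ne_nil' hne] at h2
    obtain ⟨cnt', heq, hD, hK, hN⟩ := ih (l + 1) cnt2 f (by simp at hfuel ⊢; omega)
      (fun _ => hpv') hdrop' (fun y hy => hd y (by simp [hy])) hlast'
      (fun y => hcnt2D y) (fun y hy => hcnt2K y hy) hcnt2N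
    refine ⟨cnt', ?_, hD, hK, hN⟩
    rw [shrinkLoop]
    rw [if_pos hguard, hget]
    simp only [← hc0def, ← hcnt1, ← hcnt2]
    rw [show (l : Int) + 1 = ((l + 1 : Nat) : Int) by push_cast; ring, heq]
    congr 1
    simp only [List.length_cons]
    push_cast
    ring

lemma step_inv (A₀ p rest : List Int) (num : Int) (hA : A₀ = p ++ num :: rest)
    (sA : Int × Int × Int × Int × Int) (sB : Int × Int × Int × PySem.Dict Int Int)
    (h : SWInv p sA sB) : SWInv (p ++ [num]) (stepA sA num) (stepB A₀ sB num) := by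
  obtain ⟨visited, prev, temp, prevcnt, total⟩ := sA
  obtain ⟨best, left, right, cnt⟩ := sB
  obtain ⟨a, c, k, hp, hk, hc, hpe, hpne, hleft, hright, htemp, hpcnt, htot, hcnt, hkeys, hnd⟩ := h
  dsimp only at hp hc hpe hpne hleft hright htemp hpcnt htot hcnt hkeys hnd
  have hplen : p.length = a.length + c.length + k := by
    rw [hp]; simp [List.length_append, List.length_replicate]; omega
  -- the dict after the unconditional insert of num
  have hcnt1D : ∀ y : Int, (cnt.insert num (cnt.getD num 0 + 1)).getD y 0
      = (((c ++ List.replicate k visited) ++ [num]).count y : Int) := by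
    intro y
    by_cases hy : y = num
    · rw [hy, PySem.Dict.getD_insert_self, hcnt num, List.count_append]
      simp
      omega
    · rw [PySem.Dict.getD_insert_of_ne _ _ _ hy, hcnt y, List.count_append]
      simp [Ne.symm hy]
  have hkeys1 : ∀ y ∈ (cnt.insert num (cnt.getD num 0 + 1)).keys,
      y ∈ (c ++ List.replicate k visited) ++ [num] := by
    intro y hy
    rcases (PySem.Dict.mem_keys_insert _ _ _ _).mp hy with h | h
    · exact List.mem_append.mpr (Or.inr (by simp [h]))
    · exact List.mem_append.mpr (Or.inl (hkeys y h))
  have hnd1 : (cnt.insert num (cnt.getD num 0 + 1)).keys.Nodup :=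
    PySem.Dict.nodup_keys_insert _ _ _ hnd
  by_cases h1 : num = visited
  · -- case 1: num equals the last value: the trailing run grows, the window only grows
    have hsz : (cnt.insert num (cnt.getD num 0 + 1)).size ≤ 2 := by
      rw [size_eq_keys_length]
      refine nodup_len_le_two (u := visited) (v := prev) hnd1 ?_
      intro y hy
      rcases List.mem_append.mp (hkeys1 y hy) with hw | hw
      · rcases List.mem_append.mp hw with hw | hw
        · exact hc y hw
        · exact Or.inl (List.eq_of_mem_replicate hw)
      · exact Or.inl (by rw [List.mem_singleton.mp hw, h1])
    have hsA : stepA (visited, prev, temp, prevcnt, total) num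
        = (visited, prev, temp + 1, prevcnt + 1, max (temp + 1) total) := by
      simp [stepA, h1]
    have hsB : stepB A₀ (best, left, right, cnt) num
        = (max best (right - left + 1), left, right + 1, cnt.insert num (cnt.getD num 0 + 1)) := by
      simp only [stepB]
      rw [shrink_noop _ _ _ _ hsz]
    rw [hsA, hsB]
    have hw : c ++ List.replicate (k + 1) visited
        = (c ++ List.replicate k visited) ++ [num] := by
      rw [h1, List.replicate_succ']
      simp [List.append_assoc]
    refine ⟨a, c, k + 1, ?_, by omega, hc, hpe, hpne, hleft, ?_, ?_, ?_, ?_, ?_, ?_, hnd1⟩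
    · show p ++ [num] = a ++ c ++ List.replicate (k + 1) visited
      rw [hp, h1, List.replicate_succ']
      simp [List.append_assoc]
    · show right + 1 = ((p ++ [num]).length : Int)
      rw [hright]
      simp
    · show temp + 1 = ((c.length + (k + 1) : Nat) : Int)
      rw [htemp]
      push_cast
      ring
    · show prevcnt + 1 = ((k + 1 : Nat) : Int)
      rw [hpcnt]
      push_cast
      ring
    · show max (temp + 1) total = max best (right - left + 1)
      rw [htot, htemp, hright, hleft, hplen, max_comm]
      congr 1
      push_cast
      ring
    · intro y
      rw [hw]
      exact hcnt1D y
    · intro y hy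
      rw [hw]
      exact hkeys1 y hy
  · by_cases h2 : num = prev
    · -- case 2: num equals the other window value: the window only grows, the run restarts
      have hpv : prev ≠ visited := fun hh => h1 (h2.trans hh)
      have hsz : (cnt.insert num (cnt.getD num 0 + 1)).size ≤ 2 := by
        rw [size_eq_keys_length]
        refine nodup_len_le_two (u := visited) (v := prev) hnd1 ?_
        intro y hy
        rcases List.mem_append.mp (hkeys1 y hy) with hw | hw
        · rcases List.mem_append.mp hw with hw | hw
          · exact hc y hw
          · exact Or.inl (List.eq_of_mem_replicate hw)
        · exact Or.inr (by rw [List.mem_singleton.mp hw, h2])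
      have hsA : stepA (visited, prev, temp, prevcnt, total) num
          = (num, visited, temp + 1, 1, max (temp + 1) total) := by
        simp [stepA, h2, hpv]
      have hsB : stepB A₀ (best, left, right, cnt) num
          = (max best (right - left + 1), left, right + 1, cnt.insert num (cnt.getD num 0 + 1)) := by
        simp only [stepB]
        rw [shrink_noop _ _ _ _ hsz]
      rw [hsA, hsB]
      have hw : (c ++ List.replicate k visited) ++ List.replicate 1 num
          = (c ++ List.replicate k visited) ++ [num] := by simp
      have hnonnil : a ++ (c ++ List.replicate k visited) ≠ [] := by
        intro h0
        have := congrArg List.length h0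
        simp [List.length_append, List.length_replicate] at this
        omega
      refine ⟨a, c ++ List.replicate k visited, 1, ?_, le_refl 1, ?_, ?_, ?_, hleft, ?_, ?_, by simp, ?_, ?_, ?_, hnd1⟩
      · show p ++ [num] = a ++ (c ++ List.replicate k visited) ++ List.replicate 1 num
        rw [hp]
        simp [List.append_assoc]
      · intro y hy
        rcases List.mem_append.mp hy with hw' | hw'
        · rcases hc y hw' with h' | h'
          · exact Or.inr h'
          · exact Or.inl (by rw [h', h2])
        · exact Or.inr (List.eq_of_mem_replicate hw')
      · intro h0
        exact absurd h0 hnonnil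
      · intro _
        constructor
        · show (a ++ (c ++ List.replicate k visited)).getLast? = some visited
          rw [← List.append_assoc]
          exact getLast?_append_replicate _ _ hk
        · exact fun hh => h1 hh.symm
      · show right + 1 = ((p ++ [num]).length : Int)
        rw [hright]
        simp
      · show temp + 1 = (((c ++ List.replicate k visited).length + 1 : Nat) : Int)
        rw [htemp]
        simp [List.length_append, List.length_replicate]
      · show max (temp + 1) total = max best (right - left + 1)
        rw [htot, htemp, hright, hleft, hplen, max_comm]
        congr 1
        push_cast
        ring
      · intro y
        rw [hw]
        exact hcnt1D y
      · intro y hy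
        rw [hw]
        exact hkeys1 y hy
    · -- case 3: a third distinct value arrives: the window shrinks to the trailing run plus num
      have hpvX : c ≠ [] → prev ≠ visited := by
        intro hcne
        exact (hpne (fun h0 => hcne (List.append_eq_nil_iff.mp h0).2)).2
      have hdrop0 : A₀.drop a.length = c ++ List.replicate k visited ++ num :: rest := by
        rw [hA, hp]
        have hassoc : (a ++ c ++ List.replicate k visited) ++ num :: rest
            = a ++ ((c ++ List.replicate k visited) ++ num :: rest) := by
          simp [List.append_assoc]
        rw [hassoc, List.drop_left]
      have hlastc : c ≠ [] → c.getLast? = some prev := by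
        intro hcne
        have h5 := (hpne (fun h0 => hcne (List.append_eq_nil_iff.mp h0).2)).1
        rwa [List.getLast?_append_of_ne_nil _ hcne] at h5
      have hfuelc : c.length ≤ A₀.length := by
        rw [hA]
        simp [List.length_append]
        omega
      obtain ⟨cnt', heq, hD, hK, hN⟩ := shrink_spec A₀ visited prev num k rest h1 h2 hk c
        a.length (cnt.insert num (cnt.getD num 0 + 1)) A₀.length hfuelc hpvX hdrop0 hc hlastc
        hcnt1D hkeys1 hnd1
      have hsA : stepA (visited, prev, temp, prevcnt, total) num
          = (num, visited, prevcnt + 1, 1, max (prevcnt + 1) total) := by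
        simp [stepA, h1, h2]
      have hsB : stepB A₀ (best, left, right, cnt) num
          = (max best (right - ((a.length + c.length : Nat) : Int) + 1),
             ((a.length + c.length : Nat) : Int), right + 1, cnt') := by
        simp only [stepB]
        rw [hleft, heq]
      rw [hsA, hsB]
      have hnonnil : (a ++ c) ++ List.replicate k visited ≠ [] := by
        intro h0
        have := congrArg List.length h0
        simp [List.length_append, List.length_replicate] at this
        omega
      refine ⟨a ++ c, List.replicate k visited, 1, ?_, le_refl 1, ?_, ?_, ?_, ?_, ?_, ?_, by simp, ?_, ?_, ?_, hN⟩
      · show p ++ [num] = (a ++ c) ++ List.replicate k visited ++ List.replicate 1 num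
        rw [hp]
        simp [List.append_assoc]
      · intro y hy
        exact Or.inr (List.eq_of_mem_replicate hy)
      · intro h0
        exact absurd h0 hnonnil
      · intro _
        constructor
        · exact getLast?_append_replicate _ _ hk
        · exact fun hh => h1 hh.symm
      · show ((a.length + c.length : Nat) : Int) = ((a ++ c).length : Int)
        simp [List.length_append]
      · show right + 1 = ((p ++ [num]).length : Int)
        rw [hright]
        simp
      · show prevcnt + 1 = (((List.replicate k visited).length + 1 : Nat) : Int)
        rw [hpcnt]
        simp [List.length_replicate]
      · show max (prevcnt + 1) total
            = max best (right - ((a.length + c.length : Nat) : Int) + 1)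
        rw [htot, hpcnt, hright, hplen, max_comm]
        congr 1
        push_cast
        ring
      · intro y
        have hw : List.replicate k visited ++ List.replicate 1 num
            = List.replicate k visited ++ [num] := by simp
        rw [hw]
        exact hD y
      · intro y hy
        have hw : List.replicate k visited ++ List.replicate 1 num
            = List.replicate k visited ++ [num] := by simp
        rw [hw]
        exact hK y hy

lemma base_inv (x : Int) (rest : List Int) :
    SWInv [x] (stepA (-1, -1, 0, 0, 0) x) (stepB (x :: rest) (0, 0, 0, PySem.Dict.empty) x) := by
  have hsA : stepA (-1, -1, 0, 0, 0) x = (x, -1, 1, 1, 1) := by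
    by_cases hx : x = -1 <;> simp [stepA, hx]
  have hsz : (PySem.Dict.empty.insert x ((PySem.Dict.empty (κ := Int) (ν := Int)).getD x 0 + 1)).size ≤ 2 := by
    rw [PySem.Dict.size_insert]
    simp [PySem.Dict.contains_empty, PySem.Dict.size_empty]
  have hsB : stepB (x :: rest) (0, 0, 0, PySem.Dict.empty) x
      = (1, 0, 1, PySem.Dict.empty.insert x ((PySem.Dict.empty (κ := Int) (ν := Int)).getD x 0 + 1)) := by
    simp only [stepB]
    rw [shrink_noop _ _ _ _ hsz]
    norm_num
  rw [hsA, hsB]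
  refine ⟨[], [], 1, by simp, le_refl 1, by simp, fun _ => rfl, by simp, by simp, by simp,
    by simp, by simp, by simp, ?_, ?_, PySem.Dict.nodup_keys_insert _ _ _ PySem.Dict.nodup_keys_empty⟩
  · intro y
    by_cases hy : y = x
    · rw [hy, PySem.Dict.getD_insert_self, PySem.Dict.getD_empty]
      simp
    · rw [PySem.Dict.getD_insert_of_ne _ _ _ hy, PySem.Dict.getD_empty]
      simp [Ne.symm hy]
  · intro y hy
    rcases (PySem.Dict.mem_keys_insert _ _ _ _).mp hy with h | h
    · simp [h]
    · rw [PySem.Dict.keys_empty] at h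
      exact absurd h (List.not_mem_nil)

lemma fold_inv (A₀ : List Int) :
    ∀ (rest p : List Int) sA sB, A₀ = p ++ rest → SWInv p sA sB →
    SWInv (p ++ rest) (rest.foldl stepA sA) (rest.foldl (stepB A₀) sB) := by
  intro rest
  induction rest with
  | nil =>
    intro p sA sB hA h
    simpa using h
  | cons num rest' ih =>
    intro p sA sB hA h
    have h1 := step_inv A₀ p rest' num hA sA sB h
    have h2 := ih (p ++ [num]) _ _ (by simpa using hA) h1
    simpa using h2

-- ===== VERDICT (by name: the statement is the Claim_ definition above) =====
theorem Solution_spec : Claim_equal_Solution := by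
  intro A _
  unfold Spec_Solution
  match hA : A with
  | [] => simp [Solution, Solution_alt]
  | x :: rest =>
    have h0 := base_inv x rest
    have h := fold_inv (x :: rest) rest [x] _ _ rfl h0
    simp only [List.singleton_append] at h
    obtain ⟨a, c, k, -, -, -, -, -, -, -, -, -, htot, -, -, -⟩ := h
    simp only [Solution, Solution_alt, List.foldl_cons]
    rw [if_neg (by simp)]
    exact htot
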